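-- pv_equiv track=rewrite | github.com/MilanRadeta/MITOpenCourseware6.x | 6.009/06-recursion-with-backtracking/quiz1_conflict.py | count_minesweeper_boards
-- ===== SOURCE A (Python) =====
-- def count_minesweeper_boards(board):
--     # this code contains an unnecessary optimization, in that the is_valid
--     # helper function checks to see whether the board _could possibly produce
--     # any valid complete boards_ or whether it _already contains a
--     # contradiction_.  this allows us to avoid considering many impossible
--     # boards.
--
--     # however, we did not expect your solution to do this.  it would be totally
--     # valid only to check the validity of a board _if it contained no more
--     # blanks_, but otherwise to use a similar structure.
--
--     is_valid = valid_minesweeper_board(board)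
--
--     if not is_valid:
--         # if we're already at an invalid place, return 0 (this board cannot
--         # possibly produce any valid boards)
--         return 0
--
--     blanks = [(r, c) for r, row in enumerate(board) for c, val in enumerate(row) if val == '_']
--
--     if not blanks:
--         return 1
--
--     # this board is incomplete; let's consider marking the first space as a
--     # bomb, and not as a bomb, and sum the results
--     br, bc = blanks[0]
--     out = 0
--     for new_val in 'X.':  # let X be not a bomb, but not something we need to check
--         new_board = [[(val if (r,c) != (br, bc) else new_val)
--                        for c, val in enumerate(row)]
--                      for r, row in enumerate(board)]
--         out += count_minesweeper_boards(new_board)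
--     return out
--
-- def valid_minesweeper_board(board):
--     nrows = len(board)
--     ncols = len(board[0])
--     for r in range(nrows):
--         for c in range(ncols):
--             x = board[r][c]
--             if x == ' ' or x.isdigit():
--                 neighbors = [board[nr][nc]
--                              for nr in range(r-1, r+2)
--                              for nc in range(c-1, c+2)
--                              if 0 <= nr < nrows and 0 <= nc < ncols]
--                 min_bombs = neighbors.count('.')
--                 max_bombs = min_bombs + neighbors.count('_')
--                 if not min_bombs <= (int(x) if x != ' ' else 0) <= max_bombs:
--                     return False
--     return True
-- ===== SOURCE B (Python) =====
-- # B: flat enumeration -- collect the blanks once, then count, over all 2^len(blanks)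
-- # bitmask fillings, the completed boards that pass a single final validity check
-- # (instead of A's branch-and-prune recursion).
-- def count_minesweeper_boards(board):
--     blanks = [(r, c) for r, row in enumerate(board) for c, val in enumerate(row) if val == '_']
--     total = 0
--     for mask in range(1 << len(blanks)):
--         filling = {}
--         m = mask
--         for pos in blanks:
--             filling[pos] = '.' if m & 1 else 'X'
--             m >>= 1
--         filled = [[filling.get((r, c), val) for c, val in enumerate(row)]
--                   for r, row in enumerate(board)]
--         if _board_is_valid(filled):
--             total += 1
--     return total
--
-- def _board_is_valid(board):
--     nrows, ncols = len(board), len(board[0])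
--     return all(_cell_ok(board, nrows, ncols, r, c)
--                for r in range(nrows) for c in range(ncols))
--
-- def _cell_ok(board, nrows, ncols, r, c):
--     x = board[r][c]
--     if x != ' ' and not x.isdigit():
--         return True
--     neighbors = [board[nr][nc]
--                  for nr in range(r - 1, r + 2)
--                  for nc in range(c - 1, c + 2)
--                  if 0 <= nr < nrows and 0 <= nc < ncols]
--     lo = neighbors.count('.')
--     hi = lo + neighbors.count('_')
--     return lo <= (int(x) if x != ' ' else 0) <= hi
-- ===== Notes on version B (the rewrite author's own statement) =====
-- stated objective: alternative
-- what changed: A recursively branches on the first blank and prunes with a validity pre-check at every node; B collects the blanks once and flatly enumerates all 2^len(blanks) bitmask fillings, counting the completed boards that pass a single final validity check.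
-- outside the precondition, e.g. on count_minesweeper_boards([['9', 'X'], ['X', 'X'], ['1']]): A returns 0, B returns 0
import Mathlib
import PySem

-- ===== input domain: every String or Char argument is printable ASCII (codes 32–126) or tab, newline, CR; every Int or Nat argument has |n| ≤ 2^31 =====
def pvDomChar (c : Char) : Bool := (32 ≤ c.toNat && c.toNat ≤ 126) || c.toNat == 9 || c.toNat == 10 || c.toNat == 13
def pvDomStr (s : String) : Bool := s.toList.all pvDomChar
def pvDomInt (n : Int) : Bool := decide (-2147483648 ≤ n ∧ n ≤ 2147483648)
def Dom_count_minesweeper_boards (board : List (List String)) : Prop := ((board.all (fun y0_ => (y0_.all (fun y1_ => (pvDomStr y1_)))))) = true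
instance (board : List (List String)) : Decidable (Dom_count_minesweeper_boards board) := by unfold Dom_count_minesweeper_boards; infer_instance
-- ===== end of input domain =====

-- B replaces A's branch-and-prune recursion on the first blank by a flat enumeration of all
-- 2^(number of blanks) bitmask fillings with a single final validity check per filling
-- (objective: alternative algorithm, same exact count).

-- ===== PORT A =====
-- Helpers shared by both ports: both Python versions contain, verbatim, the same cell access,
-- the same neighbour/validity computation and the same blanks comprehension.

-- board[r][c]; every call site guards 0 <= r < len(board), 0 <= c < ncols <= len(board[r])
-- (indices come from enumerate/range plus the explicit bound checks), where getD equals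
-- Python's indexing exactly; the "" default is never returned under Pre_.
def pvCell (board : List (List String)) (r c : Int) : String :=
  (board.getD r.toNat []).getD c.toNat ""

-- the neighbors comprehension in valid_minesweeper_board
def pvNeighbors (board : List (List String)) (nrows ncols r c : Int) : List String :=
  (PySem.List.pyRange (r - 1) (r + 2) 1).flatMap (fun nr =>
    (PySem.List.pyRange (c - 1) (c + 2) 1).filterMap (fun nc =>
      if 0 ≤ nr ∧ nr < nrows ∧ 0 ≤ nc ∧ nc < ncols then some (pvCell board nr nc) else none))

-- the body of the validity double loop for one cell (x is ' ' or a digit string, else no check);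
-- int(x) is guarded by x.isdigit(), so ofStr? always returns a value there
def pvCellOk (board : List (List String)) (nrows ncols r c : Int) : Bool :=
  let x := pvCell board r c
  if x = " " ∨ PySem.Str.strIsdigit x then
    let ns := pvNeighbors board nrows ncols r c
    let lo : Int := ns.count "."
    let hi : Int := lo + ns.count "_"
    let t : Int := if x ≠ " " then (PySem.Int.ofStr? x).getD 0 else 0
    decide (lo ≤ t ∧ t ≤ hi)
  else true

-- valid_minesweeper_board: the double loop with early 'return False' is the same as .all;
-- len(board[0]) is guarded by Pre_ (board nonempty)
def pvValid (board : List (List String)) : Bool :=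
  let nrows : Int := board.length
  let ncols : Int := (board.headD []).length
  (PySem.List.pyRange 0 nrows 1).all (fun r =>
    (PySem.List.pyRange 0 ncols 1).all (fun c => pvCellOk board nrows ncols r c))

-- blanks = [(r, c) for r, row in enumerate(board) for c, val in enumerate(row) if val == '_']
def pvBlanks (board : List (List String)) : List (Int × Int) :=
  (PySem.List.enumerate board 0).flatMap (fun rrow =>
    (PySem.List.enumerate rrow.2 0).filterMap (fun cval =>
      if cval.2 = "_" then some (rrow.1, cval.1) else none))

-- new_board = [[(val if (r,c) != (br,bc) else new_val) for c, val in enumerate(row)] for r, row in enumerate(board)]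
def pvFill (board : List (List String)) (br bc : Int) (v : String) : List (List String) :=
  (PySem.List.enumerate board 0).map (fun rrow =>
    (PySem.List.enumerate rrow.2 0).map (fun cval =>
      if rrow.1 = br ∧ cval.1 = bc then v else cval.2))

-- ---- lemmas needed by the port's termination proof (filling the first blank removes it) ----

theorem pv_enumerate_map {α β : Type} (f : α → β) (l : List α) (s : Int) :
    PySem.List.enumerate (l.map f) s = (PySem.List.enumerate l s).map (fun p => (p.1, f p.2)) := by
  induction l generalizing s with
  | nil => simp [PySem.List.enumerate]
  | cons x xs ih => simp [PySem.List.enumerate_cons, ih]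

theorem pv_enumerate_enumerate {α : Type} (l : List α) (s : Int) :
    PySem.List.enumerate (PySem.List.enumerate l s) s
      = (PySem.List.enumerate l s).map (fun p => (p.1, p)) := by
  induction l generalizing s with
  | nil => simp [PySem.List.enumerate]
  | cons x xs ih => simp [PySem.List.enumerate_cons, ih]

-- pvBlanks of a filled board, unfolded to a flatMap/filterMap over the ORIGINAL board
theorem pv_blanks_fill_unfold (board : List (List String)) (br bc : Int) (v : String) :
    pvBlanks (pvFill board br bc v)
      = (PySem.List.enumerate board 0).flatMap (fun rrow =>
          (PySem.List.enumerate rrow.2 0).filterMap (fun cval =>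
            if (if rrow.1 = br ∧ cval.1 = bc then v else cval.2) = "_"
            then some (rrow.1, cval.1) else none)) := by
  unfold pvBlanks pvFill
  rw [pv_enumerate_map, pv_enumerate_enumerate, List.map_map, List.flatMap_map]
  refine List.flatMap_congr (fun rrow _ => ?_)
  simp only [Function.comp]
  rw [pv_enumerate_map, pv_enumerate_enumerate, List.map_map, List.filterMap_map]
  rfl

-- row level lemma development
theorem pv_row_fill (r bc : Int) (v : String) (hv : v ≠ "_") :
    ∀ (row : List String) (s : Int) (rest : List (Int × Int)),
      (PySem.List.enumerate row s).filterMap (fun cval =>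
          if cval.2 = "_" then some (r, cval.1) else none) = (r, bc) :: rest →
      (PySem.List.enumerate row s).filterMap (fun cval =>
          if (if cval.1 = bc then v else cval.2) = "_" then some (r, cval.1) else none) = rest := by
  intro row
  induction row with
  | nil => intro s rest h; simp [PySem.List.enumerate] at h
  | cons x xs ih =>
    intro s rest h
    simp only [PySem.List.enumerate_cons, List.filterMap_cons] at h ⊢
    by_cases hx : x = "_"
    · simp only [hx, reduceIte] at h
      have hs : s = bc := by
        have : (r, s) = (r, bc) := by injection h
        injection this with h1 h2
      have hrest : (PySem.List.enumerate xs (s+1)).filterMap (fun cval =>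
            if cval.2 = "_" then some (r, cval.1) else none) = rest := by injection h
      subst hs
      simp only [if_true, if_neg hv]
      rw [← hrest]
      refine List.filterMap_congr (fun cval hm => ?_)
      rcases (PySem.List.mem_enumerate_iff _ _ _).1 hm with ⟨k, hk, rfl⟩
      have hne : ((s + 1 + (k : Int), xs[k]) : Int × String).1 ≠ s := by simp; omega
      rw [if_neg hne]
    · simp only [hx, reduceIte] at h
      have h2 : (if (if s = bc then v else x) = "_" then some (r, s) else none) = none := by
        by_cases hsbc : s = bc
        · simp [hsbc, hv]
        · simp [hsbc, hx]
      rw [h2]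
      exact ih (s+1) rest h
theorem pv_mem_row_fst (r : Int) (row : List String) (s : Int) (p : Int × Int)
    (hp : p ∈ (PySem.List.enumerate row s).filterMap (fun cval =>
        if cval.2 = "_" then some (r, cval.1) else none)) : p.1 = r := by
  rcases List.mem_filterMap.1 hp with ⟨cval, _, hc⟩
  by_cases h : cval.2 = "_"
  · rw [if_pos h] at hc; cases hc; rfl
  · rw [if_neg h] at hc; cases hc

theorem pv_blanks_fill (board : List (List String)) (br bc : Int) (v : String)
    (hv : v ≠ "_") (rest : List (Int × Int)) (h : pvBlanks board = (br, bc) :: rest) :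
    pvBlanks (pvFill board br bc v) = rest := by
  rw [pv_blanks_fill_unfold]
  unfold pvBlanks at h
  suffices H : ∀ (b : List (List String)) (s : Int) (rest : List (Int × Int)),
      s ≤ br →
      (PySem.List.enumerate b s).flatMap (fun rrow =>
        (PySem.List.enumerate rrow.2 0).filterMap (fun cval =>
          if cval.2 = "_" then some (rrow.1, cval.1) else none)) = (br, bc) :: rest →
      (PySem.List.enumerate b s).flatMap (fun rrow =>
        (PySem.List.enumerate rrow.2 0).filterMap (fun cval =>
          if (if rrow.1 = br ∧ cval.1 = bc then v else cval.2) = "_"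
          then some (rrow.1, cval.1) else none)) = rest by
    have hbr : 0 ≤ br := by
      have hmem : (br, bc) ∈ (PySem.List.enumerate board 0).flatMap (fun rrow =>
          (PySem.List.enumerate rrow.2 0).filterMap (fun cval =>
            if cval.2 = "_" then some (rrow.1, cval.1) else none)) := by
        rw [h]; exact List.mem_cons_self
      rcases List.mem_flatMap.1 hmem with ⟨rrow, hr, hp⟩
      have h1 := pv_mem_row_fst rrow.1 rrow.2 0 (br, bc) hp
      rcases (PySem.List.mem_enumerate_iff _ _ _).1 hr with ⟨k, hk, rfl⟩
      simp at h1; omega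
    exact H board 0 rest hbr h
  intro b
  induction b with
  | nil => intro s rest _ h; simp [PySem.List.enumerate] at h
  | cons row rows ih =>
    intro s rest hs h
    rw [PySem.List.enumerate_cons, List.flatMap_cons] at h ⊢
    by_cases hrb : s = br
    · cases hrow : (PySem.List.enumerate row 0).filterMap (fun cval =>
          if cval.2 = "_" then some (s, cval.1) else none) with
      | nil =>
        rw [hrow, List.nil_append] at h
        exfalso
        have hmem : (br, bc) ∈ (PySem.List.enumerate rows (s+1)).flatMap (fun rrow =>
            (PySem.List.enumerate rrow.2 0).filterMap (fun cval =>
              if cval.2 = "_" then some (rrow.1, cval.1) else none)) := by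
          rw [h]; exact List.mem_cons_self
        rcases List.mem_flatMap.1 hmem with ⟨rrow, hr, hp⟩
        have h1 := pv_mem_row_fst rrow.1 rrow.2 0 (br, bc) hp
        rcases (PySem.List.mem_enumerate_iff _ _ _).1 hr with ⟨k, hk, rfl⟩
        simp at h1; omega
      | cons q qs =>
        rw [hrow, List.cons_append] at h
        have hq1 : q = (br, bc) := by injection h
        have hq2 : qs ++ (PySem.List.enumerate rows (s+1)).flatMap (fun rrow =>
            (PySem.List.enumerate rrow.2 0).filterMap (fun cval =>
              if cval.2 = "_" then some (rrow.1, cval.1) else none)) = rest := by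
          injection h
        have hhead : (PySem.List.enumerate row 0).filterMap (fun cval =>
            if (if (s, row).1 = br ∧ cval.1 = bc then v else cval.2) = "_"
            then some (s, cval.1) else none) = qs := by
          have hr2 : (PySem.List.enumerate row 0).filterMap (fun cval =>
              if (if cval.1 = bc then v else cval.2) = "_"
              then some (s, cval.1) else none) = qs := by
            apply pv_row_fill s bc v hv row 0 qs
            rw [hrow, hq1, ← hrb]
          rw [← hr2]
          refine List.filterMap_congr (fun cval _ => ?_)
          simp [hrb]
        rw [hhead]
        have htail : (PySem.List.enumerate rows (s+1)).flatMap (fun rrow =>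
            (PySem.List.enumerate rrow.2 0).filterMap (fun cval =>
              if (if rrow.1 = br ∧ cval.1 = bc then v else cval.2) = "_"
              then some (rrow.1, cval.1) else none))
            = (PySem.List.enumerate rows (s+1)).flatMap (fun rrow =>
            (PySem.List.enumerate rrow.2 0).filterMap (fun cval =>
              if cval.2 = "_" then some (rrow.1, cval.1) else none)) := by
          refine List.flatMap_congr (fun rrow hr => ?_)
          rcases (PySem.List.mem_enumerate_iff _ _ _).1 hr with ⟨k, hk, rfl⟩
          refine List.filterMap_congr (fun cval _ => ?_)
          have hno : ¬ ((s + 1 + (k : Int), rows[k]).1 = br ∧ cval.1 = bc) := by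
            simp; intro hcon; omega
          rw [if_neg hno]
        rw [htail, hq2]
    · have hsbr : s < br := lt_of_le_of_ne hs hrb
      cases hrow : (PySem.List.enumerate row 0).filterMap (fun cval =>
          if cval.2 = "_" then some (s, cval.1) else none) with
      | cons q qs =>
        exfalso
        rw [hrow, List.cons_append] at h
        have hq1 : q = (br, bc) := by injection h
        have h1 := pv_mem_row_fst s row 0 q (by rw [hrow]; exact List.mem_cons_self)
        rw [hq1] at h1; simp at h1; omega
      | nil =>
        rw [hrow, List.nil_append] at h
        have hhead : (PySem.List.enumerate row 0).filterMap (fun cval =>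
            if (if (s, row).1 = br ∧ cval.1 = bc then v else cval.2) = "_"
            then some (s, cval.1) else none) = [] := by
          rw [List.filterMap_eq_nil_iff]
          intro cval hm
          have hx : ¬ (cval.2 = "_") := by
            intro hx
            have hmem : (s, cval.1) ∈ (PySem.List.enumerate row 0).filterMap (fun cval =>
                if cval.2 = "_" then some (s, cval.1) else none) :=
              List.mem_filterMap.2 ⟨cval, hm, by rw [if_pos hx]⟩
            rw [hrow] at hmem; simp at hmem
          have hc : ¬ ((s, row).1 = br ∧ cval.1 = bc) := fun hcon => hrb hcon.1
          rw [if_neg hc, if_neg hx]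
        rw [hhead, List.nil_append]
        exact ih (s+1) rest (by omega) h

theorem pv_blanks_fill_lt (board : List (List String)) (br bc : Int) (v : String)
    (hv : v ≠ "_") (rest : List (Int × Int)) (h : pvBlanks board = (br, bc) :: rest) :
    (pvBlanks (pvFill board br bc v)).length < (pvBlanks board).length := by
  rw [pv_blanks_fill board br bc v hv rest h, h]; simp

-- A: check validity (prune), then branch on the first blank with 'X' and '.'
def count_minesweeper_boards (board : List (List String)) : Int :=
  if pvValid board = false then 0
  else
    match hb : pvBlanks board with
    | [] => 1
    | (br, bc) :: _ =>
      count_minesweeper_boards (pvFill board br bc "X") +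
      count_minesweeper_boards (pvFill board br bc ".")
termination_by (pvBlanks board).length
decreasing_by
  · exact pv_blanks_fill_lt board br bc "X" (by decide) _ hb
  · exact pv_blanks_fill_lt board br bc "." (by decide) _ hb

-- ===== PORT B =====

-- the dict built by: m = mask; for pos in blanks: filling[pos] = '.' if m & 1 else 'X'; m >>= 1
-- (keys are the distinct blank positions; dict lookup = first match in this list)
def pvFilling : List (Int × Int) → Nat → List ((Int × Int) × String)
  | [], _ => []
  | p :: rest, m => (p, if m % 2 = 1 then "." else "X") :: pvFilling rest (m / 2)

-- filled = [[filling.get((r, c), val) for c, val in enumerate(row)] for r, row in enumerate(board)]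
def pvFillAll (board : List (List String)) (bl : List (Int × Int)) (mask : Nat) :
    List (List String) :=
  let filling := pvFilling bl mask
  (PySem.List.enumerate board 0).map (fun rrow =>
    (PySem.List.enumerate rrow.2 0).map (fun cval =>
      (((filling.find? (fun e => e.1 = (rrow.1, cval.1))).map (·.2)).getD cval.2)))

-- B: enumerate all 2^len(blanks) masks, count the fillings whose completed board is valid
def count_minesweeper_boards_alt (board : List (List String)) : Int :=
  let blanks := pvBlanks board
  (List.range (2 ^ blanks.length)).foldl
    (fun total mask => if pvValid (pvFillAll board blanks mask) then total + 1 else total) 0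

-- ===== PRECONDITION & SPEC =====
-- Pre_ excludes the empty board (len(board[0]) raises IndexError) and ragged boards whose later
-- rows are shorter than the first row: on those A's neighbour indexing raises IndexError, except
-- on rare boards where an earlier violation makes A return 0 first — and there B returns 0 too.
def Pre_count_minesweeper_boards (board : List (List String)) : Prop :=
  board ≠ [] ∧ ∀ row ∈ board, (board.headD []).length ≤ row.length
instance (board : List (List String)) : Decidable (Pre_count_minesweeper_boards board) := by
  unfold Pre_count_minesweeper_boards; infer_instance

def pvWitness_count_minesweeper_boards : List (List String) := [["1", "_"], ["_", "."]]

def Spec_count_minesweeper_boards (board : List (List String)) (out : Int) : Prop := out = count_minesweeper_boards_alt board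
instance (board : List (List String)) (out : Int) : Decidable (Spec_count_minesweeper_boards board out) := by unfold Spec_count_minesweeper_boards; infer_instance

-- ===== CLAIM (what is proved, stated in full; the proofs are below) =====
def Claim_equal_count_minesweeper_boards : Prop := ∀ (board : List (List String)), Dom_count_minesweeper_boards board → Pre_count_minesweeper_boards board → Spec_count_minesweeper_boards board (count_minesweeper_boards board)

-- ===== LEMMAS AND PROOFS =====

-- ---- shape and cell lemmas ----

theorem pv_fill_length (b : List (List String)) (br bc : Int) (v : String) :
    (pvFill b br bc v).length = b.length := by
  simp [pvFill]

theorem pv_fill_row_length (b : List (List String)) (br bc : Int) (v : String)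
    (k : Nat) (hk : k < b.length) :
    ((pvFill b br bc v)[k]'(by simp [pv_fill_length, hk])).length = b[k].length := by
  simp [pvFill, PySem.List.getElem_enumerate]

theorem pv_fill_getElem2 (b : List (List String)) (br bc : Int) (v : String)
    (k j : Nat) (hk : k < b.length) (hj : j < b[k].length) :
    ((pvFill b br bc v)[k]'(by simp [pv_fill_length, hk]))[j]'(by rw [pv_fill_row_length b br bc v k hk]; exact hj)
      = if (k : Int) = br ∧ (j : Int) = bc then v else b[k][j] := by
  simp [pvFill, PySem.List.getElem_enumerate]

theorem pv_cell_eq_getElem (b : List (List String)) (k j : Nat)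
    (hk : k < b.length) (hj : j < b[k].length) :
    pvCell b (k : Int) (j : Int) = b[k][j] := by
  unfold pvCell
  rw [List.getD_eq_getElem?_getD, List.getD_eq_getElem?_getD]
  simp [hk, hj]

-- any position in pvBlanks is a real '_' cell with nonnegative in-range indices
theorem pv_mem_blanks (b : List (List String)) (p : Int × Int) (hp : p ∈ pvBlanks b) :
    ∃ (k j : Nat), p = ((k : Int), (j : Int)) ∧ ∃ (hk : k < b.length),
      ∃ (hj : j < b[k].length), b[k][j] = "_" := by
  unfold pvBlanks at hp
  rcases List.mem_flatMap.1 hp with ⟨rrow, hr, hq⟩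
  rcases (PySem.List.mem_enumerate_iff _ _ _).1 hr with ⟨k, hk, rfl⟩
  rcases List.mem_filterMap.1 hq with ⟨cval, hc, hval⟩
  rcases (PySem.List.mem_enumerate_iff _ _ _).1 hc with ⟨j, hj, rfl⟩
  by_cases hb : b[k][j] = "_"
  · rw [if_pos hb] at hval
    cases hval
    exact ⟨k, j, by simp, by simpa using hk, by simpa using hj, hb⟩
  · rw [if_neg hb] at hval
    cases hval

theorem pv_cell_blank (b : List (List String)) (br bc : Int) (hp : (br, bc) ∈ pvBlanks b) :
    0 ≤ br ∧ 0 ≤ bc ∧ pvCell b br bc = "_" := by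
  rcases pv_mem_blanks b (br, bc) hp with ⟨k, j, hpq, hk, hj, hcell⟩
  injection hpq with h1 h2
  subst h1; subst h2
  exact ⟨by positivity, by positivity, by rw [pv_cell_eq_getElem b k j hk hj]; exact hcell⟩

-- filling a blank: the cell itself becomes v
theorem pv_cell_fill_self (b : List (List String)) (br bc : Int) (v : String)
    (hp : (br, bc) ∈ pvBlanks b) :
    pvCell (pvFill b br bc v) br bc = v := by
  rcases pv_mem_blanks b (br, bc) hp with ⟨k, j, hpq, hk, hj, hcell⟩
  injection hpq with h1 h2
  subst h1; subst h2
  have hk' : k < (pvFill b (k : Int) (j : Int) v).length := by rw [pv_fill_length]; exact hk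
  have hj' : j < ((pvFill b (k : Int) (j : Int) v)[k]'hk').length := by
    rw [pv_fill_row_length b _ _ v k hk]; exact hj
  rw [pv_cell_eq_getElem _ k j hk' hj']
  rw [pv_fill_getElem2 b _ _ v k j hk hj]
  simp

-- any other nonnegative position is unchanged
theorem pv_cell_fill_ne (b : List (List String)) (br bc : Int) (v : String)
    (r c : Int) (hr : 0 ≤ r) (hc : 0 ≤ c) (hne : ¬(r = br ∧ c = bc)) :
    pvCell (pvFill b br bc v) r c = pvCell b r c := by
  by_cases hk : r.toNat < b.length
  · by_cases hj : c.toNat < (b[r.toNat]'hk).length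
    · have hk' : r.toNat < (pvFill b br bc v).length := by rw [pv_fill_length]; exact hk
      have hj' : c.toNat < ((pvFill b br bc v)[r.toNat]'hk').length := by
        rw [pv_fill_row_length b _ _ v _ hk]; exact hj
      have e1 : pvCell (pvFill b br bc v) r c = pvCell (pvFill b br bc v) (r.toNat : Int) (c.toNat : Int) := by
        unfold pvCell; simp [hr, hc]
      have e2 : pvCell b r c = pvCell b (r.toNat : Int) (c.toNat : Int) := by
        unfold pvCell; simp [hr, hc]
      rw [e1, e2, pv_cell_eq_getElem _ _ _ hk' hj', pv_cell_eq_getElem b _ _ hk hj,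
        pv_fill_getElem2 b br bc v _ _ hk hj]
      rw [if_neg (by rw [Int.toNat_of_nonneg hr, Int.toNat_of_nonneg hc]; exact hne)]
    · -- column out of range: both sides give the default ""
      have hk' : r.toNat < (pvFill b br bc v).length := by rw [pv_fill_length]; exact hk
      have hlen : ((pvFill b br bc v)[r.toNat]'hk').length = (b[r.toNat]'hk).length :=
        pv_fill_row_length b br bc v _ hk
      unfold pvCell
      rw [List.getD_eq_getElem (pvFill b br bc v) [] hk', List.getD_eq_getElem b [] hk,
        List.getD_eq_default _ "" (by omega), List.getD_eq_default _ "" (by omega)]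
  · -- row out of range: both sides give the default row []
    unfold pvCell
    rw [List.getD_eq_default (pvFill b br bc v) [] (by rw [pv_fill_length]; omega),
      List.getD_eq_default b [] (by omega)]

theorem pv_fill_headD_length (b : List (List String)) (br bc : Int) (v : String) :
    ((pvFill b br bc v).headD []).length = (b.headD []).length := by
  cases b with
  | nil => simp [pvFill, PySem.List.enumerate]
  | cons row rows => simp [pvFill, PySem.List.enumerate_cons]

-- pointwise relation between a board and its filled version, lifted to neighbour lists
theorem pv_neighbors_forall2 (b : List (List String)) (br bc : Int) (v : String)
    (hp : (br, bc) ∈ pvBlanks b) (nrows ncols r c : Int) :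
    List.Forall₂ (fun a a' => a' = a ∨ (a = "_" ∧ a' = v))
      (pvNeighbors b nrows ncols r c)
      (pvNeighbors (pvFill b br bc v) nrows ncols r c) := by
  obtain ⟨hbr, hbc, hcell⟩ := pv_cell_blank b br bc hp
  unfold pvNeighbors
  generalize PySem.List.pyRange (r - 1) (r + 2) 1 = nrs
  have hinner : ∀ (nr : Int) (ncs : List Int),
      List.Forall₂ (fun a a' => a' = a ∨ (a = "_" ∧ a' = v))
        (ncs.filterMap (fun nc =>
          if 0 ≤ nr ∧ nr < nrows ∧ 0 ≤ nc ∧ nc < ncols then some (pvCell b nr nc) else none))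
        (ncs.filterMap (fun nc =>
          if 0 ≤ nr ∧ nr < nrows ∧ 0 ≤ nc ∧ nc < ncols then some (pvCell (pvFill b br bc v) nr nc) else none)) := by
    intro nr ncs
    induction ncs with
    | nil => simp
    | cons nc ncs ih2 =>
      simp only [List.filterMap_cons]
      by_cases hg : 0 ≤ nr ∧ nr < nrows ∧ 0 ≤ nc ∧ nc < ncols
      · rw [if_pos hg, if_pos hg]
        refine List.forall₂_cons.2 ⟨?_, ih2⟩
        by_cases he : nr = br ∧ nc = bc
        · right
          rw [he.1, he.2]
          exact ⟨hcell, pv_cell_fill_self b br bc v hp⟩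
        · left
          exact pv_cell_fill_ne b br bc v nr nc hg.1 hg.2.2.1 he
      · rw [if_neg hg, if_neg hg]
        exact ih2
  generalize PySem.List.pyRange (c - 1) (c + 2) 1 = ncs
  induction nrs with
  | nil => simp
  | cons nr nrs ih =>
    simp only [List.flatMap_cons]
    exact List.rel_append (hinner nr ncs) ih

theorem pv_count_mono (v : String) (hv : v = "X" ∨ v = ".") :
    ∀ (ns ns' : List String),
      List.Forall₂ (fun a a' => a' = a ∨ (a = "_" ∧ a' = v)) ns ns' →
      ns.count "." ≤ ns'.count "." ∧
      ns'.count "." + ns'.count "_" ≤ ns.count "." + ns.count "_" := by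
  intro ns ns' h
  induction h with
  | nil => simp
  | cons hab h ih =>
    rename_i a a' l l'
    simp only [List.count_cons]
    rcases hab with rfl | ⟨ha, hb⟩
    · omega
    · subst ha; subst hb
      rcases hv with rfl | rfl <;> simp <;> omega

theorem pv_cellOk_fill (b : List (List String)) (br bc : Int) (v : String)
    (hp : (br, bc) ∈ pvBlanks b) (hv : v = "X" ∨ v = ".")
    (nrows ncols r c : Int) (hr : 0 ≤ r) (hc : 0 ≤ c)
    (hok : pvCellOk b nrows ncols r c = false) :
    pvCellOk (pvFill b br bc v) nrows ncols r c = false := by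
  obtain ⟨hbr, hbc, hcell⟩ := pv_cell_blank b br bc hp
  have hxx : pvCell (pvFill b br bc v) r c = pvCell b r c := by
    by_cases he : r = br ∧ c = bc
    · exfalso
      have hx : pvCell b r c = "_" := by rw [he.1, he.2]; exact hcell
      unfold pvCellOk at hok
      rw [if_neg (by rw [hx]; decide)] at hok
      simp at hok
    · exact pv_cell_fill_ne b br bc v r c hr hc he
  unfold pvCellOk at hok ⊢
  rw [hxx]
  by_cases hcond : pvCell b r c = " " ∨ PySem.Str.strIsdigit (pvCell b r c)
  · rw [if_pos hcond] at hok ⊢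
    obtain ⟨hcnt1, hcnt2⟩ :=
      pv_count_mono v hv _ _ (pv_neighbors_forall2 b br bc v hp nrows ncols r c)
    simp only [decide_eq_false_iff_not] at hok ⊢
    intro hcon
    apply hok
    rcases hcon with ⟨h1, h2⟩
    have c1 : ((pvNeighbors b nrows ncols r c).count "." : Int)
        ≤ ((pvNeighbors (pvFill b br bc v) nrows ncols r c).count "." : Int) := by
      exact_mod_cast hcnt1
    have c2 : ((pvNeighbors (pvFill b br bc v) nrows ncols r c).count "." : Int)
          + ((pvNeighbors (pvFill b br bc v) nrows ncols r c).count "_" : Int)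
        ≤ ((pvNeighbors b nrows ncols r c).count "." : Int)
          + ((pvNeighbors b nrows ncols r c).count "_" : Int) := by
      exact_mod_cast hcnt2
    omega
  · rw [if_neg hcond] at hok
    simp at hok

theorem pv_valid_fill (b : List (List String)) (br bc : Int) (v : String)
    (hp : (br, bc) ∈ pvBlanks b) (hv : v = "X" ∨ v = ".")
    (hval : pvValid b = false) : pvValid (pvFill b br bc v) = false := by
  unfold pvValid at hval ⊢
  rw [pv_fill_length, pv_fill_headD_length]
  rw [List.all_eq_false] at hval ⊢
  rcases hval with ⟨r, hrmem, hrow⟩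
  refine ⟨r, hrmem, ?_⟩
  rw [Bool.not_eq_true, List.all_eq_false] at hrow ⊢
  rcases hrow with ⟨c, hcmem, hcell⟩
  refine ⟨c, hcmem, ?_⟩
  rw [Bool.not_eq_true] at hcell ⊢
  have hr0 : 0 ≤ r := (PySem.List.mem_pyRange_one.1 hrmem).1
  have hc0 : 0 ≤ c := (PySem.List.mem_pyRange_one.1 hcmem).1
  exact pv_cellOk_fill b br bc v hp hv _ _ r c hr0 hc0 hcell

theorem pv_fillAll_length (b : List (List String)) (bl : List (Int × Int)) (m : Nat) :
    (pvFillAll b bl m).length = b.length := by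
  simp [pvFillAll]

theorem pv_fillAll_row_length (b : List (List String)) (bl : List (Int × Int)) (m : Nat)
    (k : Nat) (hk : k < b.length) :
    ((pvFillAll b bl m)[k]'(by rw [pv_fillAll_length]; exact hk)).length = b[k].length := by
  simp [pvFillAll, PySem.List.getElem_enumerate]

theorem pv_fillAll_getElem2 (b : List (List String)) (bl : List (Int × Int)) (m : Nat)
    (k j : Nat) (hk : k < b.length) (hj : j < b[k].length) :
    ((pvFillAll b bl m)[k]'(by rw [pv_fillAll_length]; exact hk))[j]'(by
        rw [pv_fillAll_row_length b bl m k hk]; exact hj)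
      = (((pvFilling bl m).find? (fun e => e.1 = ((k : Int), (j : Int)))).map (·.2)).getD b[k][j] := by
  simp [pvFillAll, PySem.List.getElem_enumerate]

theorem pv_fillAll_nil (b : List (List String)) (m : Nat) : pvFillAll b [] m = b := by
  unfold pvFillAll pvFilling
  simp [PySem.List.map_snd_enumerate]

theorem pv_filling_fst (bl : List (Int × Int)) (m : Nat) (e : (Int × Int) × String)
    (he : e ∈ pvFilling bl m) : e.1 ∈ bl := by
  induction bl generalizing m with
  | nil => simp [pvFilling] at he
  | cons p rest ih =>
    rw [pvFilling] at he
    rcases List.mem_cons.1 he with rfl | hmem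
    · exact List.mem_cons_self
    · exact List.mem_cons_of_mem _ (ih (m / 2) hmem)

theorem pv_head_not_in_tail (b : List (List String)) (br bc : Int) (tl : List (Int × Int))
    (hb : pvBlanks b = (br, bc) :: tl) : (br, bc) ∉ tl := by
  intro hmem
  have htl : tl = pvBlanks (pvFill b br bc "X") :=
    (pv_blanks_fill b br bc "X" (by decide) tl hb).symm
  rw [htl] at hmem
  obtain ⟨_, _, hcell⟩ := pv_cell_blank (pvFill b br bc "X") br bc hmem
  exact absurd hcell (by
    rw [pv_cell_fill_self b br bc "X" (by rw [hb]; exact List.mem_cons_self)]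
    decide)

theorem pv_fillAll_cons (b : List (List String)) (br bc : Int) (tl : List (Int × Int))
    (m : Nat) (hb : pvBlanks b = (br, bc) :: tl) :
    pvFillAll b ((br, bc) :: tl) m
      = pvFillAll (pvFill b br bc (if m % 2 = 1 then "." else "X")) tl (m / 2) := by
  set v := if m % 2 = 1 then "." else "X" with hvdef
  have hnotin := pv_head_not_in_tail b br bc tl hb
  apply List.ext_getElem
  · rw [pv_fillAll_length, pv_fillAll_length, pv_fill_length]
  intro k hk1 hk2
  have hkb : k < b.length := by rw [pv_fillAll_length] at hk1; exact hk1
  have hkf : k < (pvFill b br bc v).length := by rw [pv_fill_length]; exact hkb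
  apply List.ext_getElem
  · rw [pv_fillAll_row_length b _ m k hkb]
    rw [show (pvFillAll (pvFill b br bc v) tl (m / 2))[k]'hk2
        = (pvFillAll (pvFill b br bc v) tl (m / 2))[k]'(by rw [pv_fillAll_length]; exact hkf) from rfl]
    rw [pv_fillAll_row_length (pvFill b br bc v) tl (m / 2) k hkf]
    rw [pv_fill_row_length b br bc v k hkb]
  intro j hj1 hj2
  have hjb : j < b[k].length := by
    rw [show (pvFillAll b ((br, bc) :: tl) m)[k]'hk1
        = (pvFillAll b ((br, bc) :: tl) m)[k]'(by rw [pv_fillAll_length]; exact hkb) from rfl] at hj1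
    rw [pv_fillAll_row_length b _ m k hkb] at hj1; exact hj1
  have hjf : j < ((pvFill b br bc v)[k]'hkf).length := by
    rw [pv_fill_row_length b br bc v k hkb]; exact hjb
  rw [pv_fillAll_getElem2 b _ m k j hkb hjb]
  rw [pv_fillAll_getElem2 (pvFill b br bc v) tl (m / 2) k j hkf hjf]
  rw [pv_fill_getElem2 b br bc v k j hkb hjb]
  rw [pvFilling]
  by_cases he : (br, bc) = ((k : Int), (j : Int))
  · rw [List.find?_cons_of_pos (by simp [he])]
    have hfnone : (pvFilling tl (m / 2)).find? (fun e => decide (e.1 = ((k : Int), (j : Int)))) = none := by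
      rw [List.find?_eq_none]
      intro e hemem
      simp only [decide_eq_true_eq]
      intro hcon
      exact hnotin (by rw [he, ← hcon]; exact pv_filling_fst tl (m / 2) e hemem)
    rw [hfnone]
    injection he with e1 e2
    subst e1; subst e2
    simp
    exact hvdef.symm
  · rw [List.find?_cons_of_neg (by simpa using he)]
    cases hf : (pvFilling tl (m / 2)).find? (fun e => decide (e.1 = ((k : Int), (j : Int)))) with
    | some e => simp
    | none =>
      simp only [Option.map_none, Option.getD_none]
      rw [if_neg (by intro hcon; exact he (by rw [← hcon.1, ← hcon.2]))]

theorem pv_split (n : Nat) (f : Nat → Bool) :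
    (List.range (2 * n)).countP f
      = (List.range n).countP (fun m => f (2 * m))
        + (List.range n).countP (fun m => f (2 * m + 1)) := by
  induction n with
  | zero => simp
  | succ n ih =>
    have h2 : 2 * (n + 1) = (2 * n + 1) + 1 := by ring
    rw [h2, List.range_succ, List.range_succ, List.countP_append, List.countP_append, ih,
      show List.range (n + 1) = List.range n ++ [n] from List.range_succ,
      List.countP_append, List.countP_append]
    simp only [List.countP_cons, List.countP_nil]
    omega

theorem pv_inv (n : Nat) : ∀ (b : List (List String)) (m : Nat),
    (pvBlanks b).length = n → pvValid b = false →
    pvValid (pvFillAll b (pvBlanks b) m) = false := by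
  induction n using Nat.strong_induction_on with
  | _ n ih =>
    intro b m hlen hval
    cases hb : pvBlanks b with
    | nil => rw [pv_fillAll_nil]; exact hval
    | cons p tl =>
      obtain ⟨br, bc⟩ := p
      rw [pv_fillAll_cons b br bc tl m hb]
      set v := if m % 2 = 1 then "." else "X" with hv
      have hvor : v = "X" ∨ v = "." := by rw [hv]; split <;> simp
      have hmem : (br, bc) ∈ pvBlanks b := by rw [hb]; exact List.mem_cons_self
      have htl : pvBlanks (pvFill b br bc v) = tl :=
        pv_blanks_fill b br bc v (by rcases hvor with h | h <;> rw [h] <;> decide) tl hb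
      have hless : tl.length < n := by rw [← hlen, hb]; simp
      have hres := ih tl.length hless (pvFill b br bc v) (m / 2) (by rw [htl])
        (pv_valid_fill b br bc v hmem hvor hval)
      rw [htl] at hres
      exact hres

theorem pv_main (board : List (List String)) :
    count_minesweeper_boards board
      = ((List.range (2 ^ (pvBlanks board).length)).countP
          (fun m => pvValid (pvFillAll board (pvBlanks board) m)) : Int) := by
  induction board using count_minesweeper_boards.induct with
  | case1 board hval =>
    rw [count_minesweeper_boards, if_pos hval]
    rw [List.countP_eq_zero.2 (fun m _ => by
      rw [pv_inv (pvBlanks board).length board m rfl hval]; simp)]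
    simp
  | case2 board hval hb =>
    have hvt : pvValid board = true := by
      cases h : pvValid board
      · exact absurd h hval
      · rfl
    rw [count_minesweeper_boards, if_neg hval]
    split
    · rw [hb]
      simp [List.range_one, pv_fillAll_nil, hvt]
    · rename_i heq
      rw [hb] at heq
      simp at heq
  | case3 board hval br bc tl hb ih1 ih2 =>
    rw [count_minesweeper_boards, if_neg hval]
    split
    · rename_i heq
      rw [hb] at heq
      simp at heq
    rename_i br' bc' tail' heq
    rw [hb] at heq
    injection heq with h1 h2
    injection h1 with hbr hbc
    subst hbr; subst hbc; subst h2
    rw [ih1, ih2]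
    have hbtlX : pvBlanks (pvFill board br bc "X") = tl :=
      pv_blanks_fill board br bc "X" (by decide) tl hb
    have hbtlD : pvBlanks (pvFill board br bc ".") = tl :=
      pv_blanks_fill board br bc "." (by decide) tl hb
    rw [hbtlX, hbtlD]
    rw [show pvBlanks board = (br, bc) :: tl from hb]
    simp only [List.length_cons]
    rw [pow_succ, mul_comm (2 ^ tl.length) 2]
    rw [pv_split (2 ^ tl.length) (fun m => pvValid (pvFillAll board ((br, bc) :: tl) m))]
    have hX : ∀ m, pvValid (pvFillAll board ((br, bc) :: tl) (2 * m))
        = pvValid (pvFillAll (pvFill board br bc "X") tl m) := by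
      intro m
      rw [pv_fillAll_cons board br bc tl (2 * m) hb]
      have h1 : (2 * m) % 2 = 0 := Nat.mul_mod_right 2 m
      have h2 : (2 * m) / 2 = m := Nat.mul_div_cancel_left m (by norm_num)
      rw [h1, h2]
      norm_num
    have hD : ∀ m, pvValid (pvFillAll board ((br, bc) :: tl) (2 * m + 1))
        = pvValid (pvFillAll (pvFill board br bc ".") tl m) := by
      intro m
      rw [pv_fillAll_cons board br bc tl (2 * m + 1) hb]
      have h1 : (2 * m + 1) % 2 = 1 := by omega
      have h2 : (2 * m + 1) / 2 = m := by omega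
      rw [h1, h2]
      norm_num
    have e1 : (List.range (2 ^ tl.length)).countP
          (fun m => pvValid (pvFillAll board ((br, bc) :: tl) (2 * m)))
        = (List.range (2 ^ tl.length)).countP
          (fun m => pvValid (pvFillAll (pvFill board br bc "X") tl m)) :=
      List.countP_congr (fun m _ => by rw [hX m])
    have e2 : (List.range (2 ^ tl.length)).countP
          (fun m => pvValid (pvFillAll board ((br, bc) :: tl) (2 * m + 1)))
        = (List.range (2 ^ tl.length)).countP
          (fun m => pvValid (pvFillAll (pvFill board br bc ".") tl m)) :=
      List.countP_congr (fun m _ => by rw [hD m])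
    simp only [e1, e2]
    push_cast
    ring

-- ===== VERDICT (by name: the statement is the Claim_ definition above) =====
theorem count_minesweeper_boards_spec : Claim_equal_count_minesweeper_boards := by
  intro board _ _
  unfold Spec_count_minesweeper_boards count_minesweeper_boards_alt
  rw [pv_main]
  show _ = List.foldl _ (0 : Int) _
  rw [PySem.List.foldl_count_if (fun m => pvValid (pvFillAll board (pvBlanks board) m))
      (List.range (2 ^ (pvBlanks board).length)) 0]
  simp
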